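-- pv_equiv track=rewrite | github.com/HarishChandran3304/cp-solutions | CodeChef/Contests/Starters-70/MINDIST.py | fn
-- ===== SOURCE A (Python) =====
-- def fn(s):
--     indices = []
--     for i, n in enumerate(s):
--         if n == "1":
--             indices.append(i)
--
--     for i in range(len(indices)-1):
--         nofzeroes = indices[i+1]-indices[i]-1
--         if nofzeroes%2 == 0:
--             return 1
--
--     return 2
-- ===== SOURCE B (Python) =====
-- def fn(s):
--     # A gap of zeros between consecutive '1's is even iff the two positions have
--     # opposite parity; some adjacent pair of '1's has opposite parity iff the
--     # '1' positions occupy both parity classes. So: collect the parities of all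
--     # '1' positions and answer 1 iff both parities occur.
--     parities = {i % 2 for i, c in enumerate(s) if c == "1"}
--     return 1 if 0 in parities and 1 in parities else 2
-- ===== Notes on version B (the rewrite author's own statement) =====
-- stated objective: simpler
-- what changed: B abandons the gap computation altogether: instead of building the index list and testing each consecutive gap's parity, it collects the set of parities (i % 2) of the '1' positions and returns 1 iff both parity classes occur, which is equivalent because an even zero-gap between adjacent '1's is exactly a parity change.
import Mathlib
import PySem

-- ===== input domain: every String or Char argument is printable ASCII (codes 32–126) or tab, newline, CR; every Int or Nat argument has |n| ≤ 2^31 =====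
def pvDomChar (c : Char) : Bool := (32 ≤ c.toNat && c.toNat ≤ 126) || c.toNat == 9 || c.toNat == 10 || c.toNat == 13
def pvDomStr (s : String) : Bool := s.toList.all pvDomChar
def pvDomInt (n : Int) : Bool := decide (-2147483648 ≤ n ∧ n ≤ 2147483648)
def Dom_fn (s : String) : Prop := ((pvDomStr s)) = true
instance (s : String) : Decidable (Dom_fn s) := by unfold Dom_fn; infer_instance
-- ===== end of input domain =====

-- B replaces A's gap-parity scan over the index list by a set of parity classes of the
-- '1' positions: answer 1 iff both parities occur (an even zero-gap is a parity change).

-- ===== PORT A =====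
-- the 'for i in range(len(indices)-1)' loop with early return, recursing over the range list;
-- indices accessed with pyGetD (every index drawn from range(len-1) is in range, so the
-- default 0 is never returned)
def fnCheck (indices : List Int) : List Int → Int
  | [] => 2
  | k :: rest =>
    let nofzeroes := PySem.List.pyGetD indices (k + 1) 0 - PySem.List.pyGetD indices k 0 - 1
    if PySem.Int.mod nofzeroes 2 == 0 then 1 else fnCheck indices rest

def fn (s : String) : Int :=
  let indices : List Int :=
    (PySem.List.enumerate s.toList 0).foldl
      (fun acc p => if p.2 == '1' then acc ++ [p.1] else acc) []
  fnCheck indices (PySem.List.pyRange 0 ((indices.length : Int) - 1) 1)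

-- ===== PORT B =====
-- B's set comprehension: fold over enumerate(s) building the PySem.Set of parities i % 2
-- of the '1' positions, then the two membership tests
def fn_alt (s : String) : Int :=
  let parities : PySem.Set Int :=
    (PySem.List.enumerate s.toList 0).foldl
      (fun acc p => if p.2 == '1' then PySem.Set.add acc (PySem.Int.mod p.1 2) else acc)
      PySem.Set.empty
  if PySem.Set.contains parities 0 && PySem.Set.contains parities 1 then 1 else 2

-- ===== PRECONDITION & SPEC =====
def Spec_fn (s : String) (out : Int) : Prop := out = fn_alt s
instance (s : String) (out : Int) : Decidable (Spec_fn s out) := by unfold Spec_fn; infer_instance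

-- ===== CLAIM (what is proved, stated in full; the proofs are below) =====
def Claim_equal_fn : Prop := ∀ (s : String), Dom_fn s → Spec_fn s (fn s)

-- ===== LEMMAS AND PROOFS =====

-- characterisation of A: parity check over consecutive pairs of an index list
def pairCheck : List Int → Int
  | [] => 2
  | [_] => 2
  | a :: b :: t => if PySem.Int.mod (b - a - 1) 2 == 0 then 1 else pairCheck (b :: t)

-- positions of '1' in cs, counting from i
def ones : List Char → Int → List Int
  | [], _ => []
  | c :: cs, i => if c == '1' then i :: ones cs (i + 1) else ones cs (i + 1)

lemma pairCheck_short (l : List Int) (h : l.length ≤ 1) : pairCheck l = 2 := by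
  match l with
  | [] => rfl
  | [_] => rfl
  | _ :: _ :: _ => simp at h

lemma indices_eq_ones (cs : List Char) : ∀ (i : Int) (acc : List Int),
    (PySem.List.enumerate cs i).foldl
      (fun acc p => if p.2 == '1' then acc ++ [p.1] else acc) acc = acc ++ ones cs i := by
  induction cs with
  | nil => intro i acc; simp [PySem.List.enumerate_nil, ones]
  | cons c cs ih =>
    intro i acc
    rw [PySem.List.enumerate_cons, List.foldl_cons]
    by_cases hc : c = '1'
    · rw [show (if ((i, c).2 == '1') = true then acc ++ [(i, c).1] else acc)
            = acc ++ [i] from by simp [hc]]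
      rw [ih]; simp [ones, hc]
    · rw [show (if ((i, c).2 == '1') = true then acc ++ [(i, c).1] else acc)
            = acc from by simp [hc]]
      rw [ih]; simp [ones, hc]

lemma fnCheck_eq_pairCheck (idxs : List Int) :
    ∀ (n k : Nat), idxs.length - k ≤ n →
      fnCheck idxs (PySem.List.pyRange (k : Int) ((idxs.length : Int) - 1) 1)
        = pairCheck (idxs.drop k) := by
  intro n
  induction n with
  | zero =>
    intro k hk
    have hlen : idxs.length ≤ k := by omega
    rw [PySem.List.pyRange_one_eq_nil (by omega)]
    rw [pairCheck_short _ (by simp; omega)]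
    rfl
  | succ n ih =>
    intro k hk
    by_cases h : (k : Int) < (idxs.length : Int) - 1
    · have hk1 : k + 1 < idxs.length := by omega
      have hk0 : k < idxs.length := by omega
      rw [PySem.List.pyRange_one_cons h]
      show (if PySem.Int.mod (PySem.List.pyGetD idxs ((k : Int) + 1) 0
              - PySem.List.pyGetD idxs (k : Int) 0 - 1) 2 == 0 then 1
            else fnCheck idxs (PySem.List.pyRange ((k : Int) + 1) ((idxs.length : Int) - 1) 1)) = _
      have g1 : PySem.List.pyGetD idxs ((k : Int) + 1) 0 = idxs[k + 1] := by
        have := PySem.List.pyGetD_eq_getElem idxs (i := (k : Int) + 1) 0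
          (by omega) (by omega)
        simpa using this
      have g0 : PySem.List.pyGetD idxs (i := (k : Int)) 0 = idxs[k] := by
        have := PySem.List.pyGetD_eq_getElem idxs (i := (k : Int)) 0
          (by omega) (by omega)
        simpa using this
      have hdrop : idxs.drop k = idxs[k] :: idxs[k + 1] :: idxs.drop (k + 2) := by
        rw [List.drop_eq_getElem_cons hk0, List.drop_eq_getElem_cons hk1]
      have hdrop1 : idxs.drop (k + 1) = idxs[k + 1] :: idxs.drop (k + 2) :=
        List.drop_eq_getElem_cons hk1
      rw [g1, g0, hdrop]
      show _ = (if PySem.Int.mod (idxs[k+1] - idxs[k] - 1) 2 == 0 then 1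
                else pairCheck (idxs[k+1] :: idxs.drop (k + 2)))
      by_cases hmod : PySem.Int.mod (idxs[k+1] - idxs[k] - 1) 2 = 0
      · rw [if_pos (beq_iff_eq.mpr hmod), if_pos (beq_iff_eq.mpr hmod)]
      · rw [if_neg (fun h => hmod (beq_iff_eq.mp h)),
            if_neg (fun h => hmod (beq_iff_eq.mp h))]
        rw [← hdrop1]
        have := ih (k + 1) (by omega)
        rw [← this]
        norm_cast
    · rw [PySem.List.pyRange_one_eq_nil (by omega)]
      rw [pairCheck_short _ (by simp; omega)]
      rfl

lemma fn_eq_pairCheck (s : String) : fn s = pairCheck (ones s.toList 0) := by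
  show fnCheck _ _ = _
  rw [indices_eq_ones s.toList 0 []]
  simp only [List.nil_append]
  have := fnCheck_eq_pairCheck (ones s.toList 0) (ones s.toList 0).length 0 (by omega)
  simpa using this

-- parity arithmetic: the zero-gap between a and b is even iff a and b have opposite parity
lemma mod_two_mem (a : Int) : PySem.Int.mod a 2 = 0 ∨ PySem.Int.mod a 2 = 1 := by
  have h1 := PySem.Int.mod_nonneg a (b := 2) (by omega)
  have h2 := PySem.Int.mod_lt a (b := 2) (by omega)
  omega

lemma gap_even_iff (a b : Int) :
    PySem.Int.mod (b - a - 1) 2 = 0 ↔ PySem.Int.mod b 2 ≠ PySem.Int.mod a 2 := by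
  simp only [PySem.Int.mod_eq_emod_of_pos (show (0:Int) < 2 by omega)]
  omega

-- A returns 2 iff every '1' position has the same parity as the first
lemma pairCheck_eq_two_iff (a : Int) (t : List Int) :
    pairCheck (a :: t) = 2 ↔ ∀ x ∈ t, PySem.Int.mod x 2 = PySem.Int.mod a 2 := by
  induction t generalizing a with
  | nil => simp [pairCheck]
  | cons b t ih =>
    show (if PySem.Int.mod (b - a - 1) 2 == 0 then 1 else pairCheck (b :: t)) = 2 ↔ _
    by_cases hab : PySem.Int.mod b 2 = PySem.Int.mod a 2
    · have hgap : PySem.Int.mod (b - a - 1) 2 ≠ 0 := fun h => (gap_even_iff a b).mp h hab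
      rw [if_neg (fun hh => hgap (beq_iff_eq.mp hh))]
      rw [ih]
      constructor
      · intro h x hx
        rcases List.mem_cons.mp hx with rfl | hx
        · exact hab
        · rw [h x hx, hab]
      · intro h x hx
        rw [h x (List.mem_cons_of_mem _ hx), hab]
    · have hgap : PySem.Int.mod (b - a - 1) 2 = 0 := (gap_even_iff a b).mpr hab
      rw [if_pos (beq_iff_eq.mpr hgap)]
      constructor
      · intro h; omega
      · intro h; exact absurd (h b (List.mem_cons_self)) hab

lemma pairCheck_one_or_two (l : List Int) : pairCheck l = 1 ∨ pairCheck l = 2 := by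
  induction l with
  | nil => right; rfl
  | cons a t ih =>
    match t, ih with
    | [], _ => right; rfl
    | b :: t, ih =>
      by_cases h : PySem.Int.mod (b - a - 1) 2 = 0
      · left
        show (if PySem.Int.mod (b - a - 1) 2 == 0 then 1 else pairCheck (b :: t)) = 1
        rw [if_pos (beq_iff_eq.mpr h)]
      · have he : pairCheck (a :: b :: t) = pairCheck (b :: t) := by
          show (if PySem.Int.mod (b - a - 1) 2 == 0 then 1 else pairCheck (b :: t)) = _
          rw [if_neg (fun hh => h (beq_iff_eq.mp hh))]
        rw [he]; exact ih

-- membership in B's parity set: exactly the mod-2 classes of the '1' positions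
lemma mem_parityFold (cs : List Char) : ∀ (i : Int) (acc : List Int) (x : Int),
    (x ∈ (PySem.List.enumerate cs i).foldl
        (fun acc p => if p.2 == '1' then PySem.Set.add acc (PySem.Int.mod p.1 2) else acc) acc)
      ↔ x ∈ acc ∨ ∃ j ∈ ones cs i, PySem.Int.mod j 2 = x := by
  induction cs with
  | nil => intro i acc x; simp [PySem.List.enumerate_nil, ones]
  | cons c cs ih =>
    intro i acc x
    rw [PySem.List.enumerate_cons, List.foldl_cons]
    by_cases hc : c = '1'
    · rw [show (if ((i, c).2 == '1') = true
              then PySem.Set.add acc (PySem.Int.mod (i, c).1 2) else acc)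
            = PySem.Set.add acc (PySem.Int.mod i 2) from by simp [hc]]
      rw [ih, PySem.Set.mem_add]
      simp only [ones, hc]
      constructor
      · rintro ((h | rfl) | ⟨j, hj, hjx⟩)
        · exact Or.inl h
        · exact Or.inr ⟨i, by simp, rfl⟩
        · exact Or.inr ⟨j, by simp [hj], hjx⟩
      · rintro (h | ⟨j, hj, hjx⟩)
        · exact Or.inl (Or.inl h)
        · rcases List.mem_cons.mp hj with rfl | hj
          · exact Or.inl (Or.inr hjx.symm)
          · exact Or.inr ⟨j, hj, hjx⟩
    · rw [show (if ((i, c).2 == '1') = true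
              then PySem.Set.add acc (PySem.Int.mod (i, c).1 2) else acc)
            = acc from by simp [hc]]
      rw [ih]; simp [ones, hc]

lemma fn_alt_char (s : String) :
    fn_alt s = if (∃ j ∈ ones s.toList 0, PySem.Int.mod j 2 = 0)
                  ∧ (∃ j ∈ ones s.toList 0, PySem.Int.mod j 2 = 1) then 1 else 2 := by
  have h0 := mem_parityFold s.toList 0 PySem.Set.empty 0
  have h1 := mem_parityFold s.toList 0 PySem.Set.empty 1
  simp only [PySem.Set.empty, List.not_mem_nil, false_or] at h0 h1
  have hcond :
      (PySem.Set.contains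
          ((PySem.List.enumerate s.toList 0).foldl
            (fun acc p => if p.2 == '1' then PySem.Set.add acc (PySem.Int.mod p.1 2) else acc)
            PySem.Set.empty) 0
        && PySem.Set.contains
          ((PySem.List.enumerate s.toList 0).foldl
            (fun acc p => if p.2 == '1' then PySem.Set.add acc (PySem.Int.mod p.1 2) else acc)
            PySem.Set.empty) 1) = true
      ↔ (∃ j ∈ ones s.toList 0, PySem.Int.mod j 2 = 0)
        ∧ (∃ j ∈ ones s.toList 0, PySem.Int.mod j 2 = 1) := by
    rw [Bool.and_eq_true, PySem.Set.contains_iff, PySem.Set.contains_iff]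
    simp only [PySem.Set.empty]
    rw [h0, h1]
  show (if _ && _ then (1 : Int) else 2) = _
  by_cases hb : (∃ j ∈ ones s.toList 0, PySem.Int.mod j 2 = 0)
              ∧ (∃ j ∈ ones s.toList 0, PySem.Int.mod j 2 = 1)
  · rw [if_pos (hcond.mpr hb), if_pos hb]
  · rw [if_neg (fun h => hb (hcond.mp h)), if_neg hb]

-- ===== VERDICT (by name: the statement is the Claim_ definition above) =====
theorem fn_spec : Claim_equal_fn := by
  intro s _
  unfold Spec_fn
  rw [fn_eq_pairCheck, fn_alt_char]
  match h : ones s.toList 0 with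
  | [] => simp [pairCheck]
  | a :: t =>
    by_cases hboth : (∃ j ∈ a :: t, PySem.Int.mod j 2 = 0)
                   ∧ (∃ j ∈ a :: t, PySem.Int.mod j 2 = 1)
    · rw [if_pos hboth]
      rcases pairCheck_one_or_two (a :: t) with h1 | h2
      · exact h1
      · exfalso
        obtain ⟨⟨j0, hj0, hj0m⟩, ⟨j1, hj1, hj1m⟩⟩ := hboth
        have hall := (pairCheck_eq_two_iff a t).mp h2
        have e0 : PySem.Int.mod j0 2 = PySem.Int.mod a 2 := by
          rcases List.mem_cons.mp hj0 with rfl | hj0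
          · rfl
          · exact hall _ hj0
        have e1 : PySem.Int.mod j1 2 = PySem.Int.mod a 2 := by
          rcases List.mem_cons.mp hj1 with rfl | hj1
          · rfl
          · exact hall _ hj1
        omega
    · rw [if_neg hboth]
      rw [pairCheck_eq_two_iff]
      intro x hx
      by_contra hne
      rcases mod_two_mem a with ha | ha <;> rcases mod_two_mem x with hxm | hxm
      · omega
      · exact hboth ⟨⟨a, List.mem_cons_self, ha⟩, ⟨x, List.mem_cons_of_mem _ hx, hxm⟩⟩
      · exact hboth ⟨⟨x, List.mem_cons_of_mem _ hx, hxm⟩, ⟨a, List.mem_cons_self, ha⟩⟩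
      · omega
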